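-- pv_equiv track=rewrite | github.com/ChengyueWang/mlir-aie | tools/visual/visual_tool/appviz.py | _count_total_lines
-- ===== SOURCE A (Python) =====
-- def _count_total_lines(buffer_info, lock_info, outgoing_connections, incoming_connections):
--     """Count total lines that would be displayed"""
--     total_lines = 0
--
--     # Kernel header + content
--     total_lines += 2
--
--     # Memory section
--     if buffer_info:
--         total_lines += 1  # header
--         total_lines += len(buffer_info)  # content lines
--
--     # Lock section
--     if lock_info:
--         total_lines += 1  # header
--         total_lines += len(lock_info)  # content lines
--
--     # Outgoing connections
--     if outgoing_connections:
--         total_lines += 1  # header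
--         # Count connection pairs properly
--         i = 0
--         while i < len(outgoing_connections):
--             conn_info = outgoing_connections[i]
--             if not conn_info or not conn_info.strip() or conn_info.startswith("flow:"):
--                 i += 1
--                 continue
--
--             # Count this connection
--             total_lines += 1
--
--             # Check if next item is flow info
--             if i + 1 < len(outgoing_connections) and outgoing_connections[i + 1].startswith("flow:"):
--                 total_lines += 1  # flow line
--                 i += 2
--             else:
--                 i += 1
--
--     # Incoming connections
--     if incoming_connections:
--         total_lines += 1  # header
--         # Count connection pairs properly
--         i = 0
--         while i < len(incoming_connections):
--             conn_info = incoming_connections[i]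
--             if not conn_info or not conn_info.strip() or conn_info.startswith("flow:"):
--                 i += 1
--                 continue
--
--             # Count this connection
--             total_lines += 1
--
--             # Check if next item is flow info
--             if i + 1 < len(incoming_connections) and incoming_connections[i + 1].startswith("flow:"):
--                 total_lines += 1  # flow line
--                 i += 2
--             else:
--                 i += 1
--
--     return total_lines
-- ===== SOURCE B (Python) =====
-- def _count_total_lines(buffer_info, lock_info, outgoing_connections, incoming_connections):
--     """Count total lines that would be displayed (single forward pass, no index lookahead)"""
--
--     def _conn_lines(conns):
--         if not conns:
--             return 0
--         n = 1  # header
--         prev_was_conn = False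
--         for e in conns:
--             if prev_was_conn and e.startswith("flow:"):
--                 n += 1  # flow line attached to the previous connection
--                 prev_was_conn = False
--             elif not e or not e.strip() or e.startswith("flow:"):
--                 prev_was_conn = False
--             else:
--                 n += 1  # a connection line
--                 prev_was_conn = True
--         return n
--
--     total = 2  # kernel header + content
--     if buffer_info:
--         total += 1 + len(buffer_info)
--     if lock_info:
--         total += 1 + len(lock_info)
--     return total + _conn_lines(outgoing_connections) + _conn_lines(incoming_connections)
-- ===== Notes on version B (the rewrite author's own statement) =====
-- stated objective: simpler
-- what changed: Replaces the two index-based while loops with i+=1/i+=2 lookahead by a single forward for-loop per connection list that maintains a prev_was_conn flag, so no index arithmetic, repeated indexing or explicit lookahead is needed.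
import Mathlib
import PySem

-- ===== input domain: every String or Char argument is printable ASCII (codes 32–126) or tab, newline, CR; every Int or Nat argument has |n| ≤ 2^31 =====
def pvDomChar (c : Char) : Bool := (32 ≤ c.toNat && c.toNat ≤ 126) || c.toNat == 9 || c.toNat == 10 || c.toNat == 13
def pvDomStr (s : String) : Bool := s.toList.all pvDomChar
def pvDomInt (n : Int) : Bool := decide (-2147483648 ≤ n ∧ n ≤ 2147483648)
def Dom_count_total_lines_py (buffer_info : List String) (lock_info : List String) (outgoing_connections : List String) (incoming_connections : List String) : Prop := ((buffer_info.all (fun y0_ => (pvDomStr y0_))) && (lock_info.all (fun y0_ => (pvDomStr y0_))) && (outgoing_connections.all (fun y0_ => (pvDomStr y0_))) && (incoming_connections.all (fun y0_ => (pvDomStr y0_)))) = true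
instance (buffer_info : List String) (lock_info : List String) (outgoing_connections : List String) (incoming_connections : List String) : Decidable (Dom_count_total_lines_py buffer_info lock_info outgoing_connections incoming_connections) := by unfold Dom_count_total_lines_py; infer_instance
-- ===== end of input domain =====

-- B replaces A's index-based while loops (with i+=1/i+=2 lookahead) by one forward pass
-- per connection list carrying a prev_was_conn flag; same count, simpler traversal.

-- ===== PORT A =====
-- the while loop over a connection list, index i, counting connection + flow lines
def pvALoop (conns : List String) (i : Nat) : Int :=
  if _h : i < conns.length then
    -- conn_info = conns[i]; skip if falsy / blank / flow-prefixed
    if conns.getD i "" = "" ∨ PySem.Str.strip (conns.getD i "") = "" ∨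
        PySem.Str.startswith (conns.getD i "") "flow:" = true then
      pvALoop conns (i + 1)
    else if i + 1 < conns.length ∧ PySem.Str.startswith (conns.getD (i + 1) "") "flow:" = true then
      2 + pvALoop conns (i + 2)  -- connection line + flow line, skip both
    else
      1 + pvALoop conns (i + 1)  -- connection line only
  else 0
termination_by conns.length - i

def count_total_lines_py (buffer_info : List String) (lock_info : List String) (outgoing_connections : List String) (incoming_connections : List String) : Int :=
  2
  + (if buffer_info ≠ [] then 1 + (buffer_info.length : Int) else 0)
  + (if lock_info ≠ [] then 1 + (lock_info.length : Int) else 0)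
  + (if outgoing_connections ≠ [] then 1 + pvALoop outgoing_connections 0 else 0)
  + (if incoming_connections ≠ [] then 1 + pvALoop incoming_connections 0 else 0)

-- ===== PORT B =====
-- single forward pass with a prev_was_conn flag (Source B's for-loop)
def pvBLoop : List String → Bool → Int
  | [], _ => 0
  | e :: rest, prev =>
    if prev = true ∧ PySem.Str.startswith e "flow:" = true then
      1 + pvBLoop rest false
    else if e = "" ∨ PySem.Str.strip e = "" ∨ PySem.Str.startswith e "flow:" = true then
      pvBLoop rest false
    else
      1 + pvBLoop rest true

def count_total_lines_py_alt (buffer_info : List String) (lock_info : List String) (outgoing_connections : List String) (incoming_connections : List String) : Int :=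
  2
  + (if buffer_info ≠ [] then 1 + (buffer_info.length : Int) else 0)
  + (if lock_info ≠ [] then 1 + (lock_info.length : Int) else 0)
  + (if outgoing_connections ≠ [] then 1 + pvBLoop outgoing_connections false else 0)
  + (if incoming_connections ≠ [] then 1 + pvBLoop incoming_connections false else 0)

-- ===== PRECONDITION & SPEC =====
def Spec_count_total_lines_py (buffer_info : List String) (lock_info : List String) (outgoing_connections : List String) (incoming_connections : List String) (out : Int) : Prop := out = count_total_lines_py_alt buffer_info lock_info outgoing_connections incoming_connections
instance (buffer_info : List String) (lock_info : List String) (outgoing_connections : List String) (incoming_connections : List String) (out : Int) : Decidable (Spec_count_total_lines_py buffer_info lock_info outgoing_connections incoming_connections out) := by unfold Spec_count_total_lines_py; infer_instance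

-- ===== CLAIM (what is proved, stated in full; the proofs are below) =====
def Claim_equal_count_total_lines_py : Prop := ∀ (buffer_info : List String) (lock_info : List String) (outgoing_connections : List String) (incoming_connections : List String), Dom_count_total_lines_py buffer_info lock_info outgoing_connections incoming_connections → Spec_count_total_lines_py buffer_info lock_info outgoing_connections incoming_connections (count_total_lines_py buffer_info lock_info outgoing_connections incoming_connections)

-- ===== LEMMAS AND PROOFS =====

-- the flag only matters when the head starts with "flow:"
theorem pvBLoop_flag (l : List String)
    (h : ∀ e, l.head? = some e → ¬ PySem.Str.startswith e "flow:" = true) :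
    pvBLoop l true = pvBLoop l false := by
  cases l with
  | nil => rfl
  | cons e rest =>
    have he : ¬ PySem.Str.startswith e "flow:" = true := h e rfl
    simp [PySem.Str.startswith_eq] at he
    simp [pvBLoop, he]

theorem pvALoop_eq_pvBLoop (conns : List String) :
    ∀ k i, conns.length - i ≤ k → pvALoop conns i = pvBLoop (conns.drop i) false := by
  intro k
  induction k with
  | zero =>
    intro i h
    have hi : conns.length ≤ i := by omega
    rw [pvALoop, dif_neg (by omega), List.drop_eq_nil_of_le hi]
    rfl
  | succ k ih =>
    intro i h
    by_cases hi : i < conns.length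
    · have hgd : conns.getD i "" = conns[i] := List.getD_eq_getElem conns "" hi
      rw [pvALoop, dif_pos hi, List.drop_eq_getElem_cons hi]
      by_cases hskip : conns.getD i "" = "" ∨ PySem.Str.strip (conns.getD i "") = "" ∨
          PySem.Str.startswith (conns.getD i "") "flow:" = true
      · rw [if_pos hskip, ih (i + 1) (by omega)]
        rw [hgd] at hskip
        simp [PySem.Str.startswith_eq] at hskip
        rcases hskip with h0 | h0 | h0 <;> simp [pvBLoop, h0]
      · rw [if_neg hskip]
        rw [hgd] at hskip
        push Not at hskip
        simp [PySem.Str.startswith_eq] at hskip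
        by_cases hfn : i + 1 < conns.length ∧
            PySem.Str.startswith (conns.getD (i + 1) "") "flow:" = true
        · rw [if_pos hfn, ih (i + 2) (by omega)]
          obtain ⟨h1, h2⟩ := hfn
          have hgd1 : conns.getD (i + 1) "" = conns[i + 1] := List.getD_eq_getElem conns "" h1
          rw [hgd1] at h2
          simp [PySem.Str.startswith_eq] at h2
          rw [List.drop_eq_getElem_cons h1]
          simp [pvBLoop, hskip.1, hskip.2.1, hskip.2.2, h2]
          ring
        · rw [if_neg hfn, ih (i + 1) (by omega)]
          have hflag : pvBLoop (conns.drop (i + 1)) true = pvBLoop (conns.drop (i + 1)) false := by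
            apply pvBLoop_flag
            intro e he
            by_cases h1 : i + 1 < conns.length
            · rw [List.drop_eq_getElem_cons h1] at he
              simp only [List.head?_cons, Option.some.injEq] at he
              subst he
              have hgd1 := List.getD_eq_getElem conns "" h1
              intro hc
              exact hfn ⟨h1, by rw [hgd1]; exact hc⟩
            · rw [List.drop_eq_nil_of_le (by omega)] at he
              simp at he
          simp [pvBLoop, hskip.1, hskip.2.1, hskip.2.2, hflag]
    · rw [pvALoop, dif_neg hi, List.drop_eq_nil_of_le (by omega)]
      rfl

theorem pvALoop_eq_pvBLoop₀ (conns : List String) : pvALoop conns 0 = pvBLoop conns false := by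
  simpa using pvALoop_eq_pvBLoop conns conns.length 0 (by omega)

-- ===== VERDICT (by name: the statement is the Claim_ definition above) =====
theorem count_total_lines_py_spec : Claim_equal_count_total_lines_py := by
  intro buffer_info lock_info outgoing_connections incoming_connections _
  unfold Spec_count_total_lines_py count_total_lines_py count_total_lines_py_alt
  rw [pvALoop_eq_pvBLoop₀, pvALoop_eq_pvBLoop₀]
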